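-- pv_equiv track=rewrite | github.com/alvinliong/CodeVenture | User.py | is_DOB_valid
-- ===== SOURCE A (Python) =====
-- def is_DOB_valid(date_of_birth):
--     if not(len(date_of_birth)==10):
--         return False
--     if (date_of_birth[2]=='/' and date_of_birth[5] == '/'):
--         DD = date_of_birth[0:2]
--         MM = date_of_birth[3:5]
--         YYYY = date_of_birth[6:10]
--         try:
--             YYYY = int(YYYY)
--             if not(1800<YYYY<9999):
--                 return False
--         except ValueError:
--             return False
--         valid_days = []
--         if MM in ['01','03','05','07','08','10','12']:
--             # 31 day month
--             for day in range(1,32):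
--                 valid_days.append(str(day).zfill(2))
--             if not(DD in valid_days):
--                 return False
--         elif MM in ['04','06','09','11']:
--             # 30 day month
--             for day in range(1,31):
--                 valid_days.append(str(day).zfill(2))
--             if not(DD in valid_days):
--                 return False
--         elif MM == '02':
--             if YYYY%4 == 0:
--                 # Leap year
--                 for day in range(1, 30):
--                     valid_days.append(str(day).zfill(2))
--                 if not(DD in valid_days):
--                     return False
--             else:
--                 # not leap year
--                 for day in range(1, 29):
--                     valid_days.append(str(day).zfill(2))
--                 if not(DD in valid_days):
--                     return False
--         else:
--             return False
--     else:
--         return False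
--     return True
-- ===== SOURCE B (Python) =====
-- def is_DOB_valid(date_of_birth):
--     if len(date_of_birth) != 10 or date_of_birth[2] != '/' or date_of_birth[5] != '/':
--         return False
--     try:
--         year = int(date_of_birth[6:10])
--     except ValueError:
--         return False
--     if not (1800 < year < 9999):
--         return False
--     MM = date_of_birth[3:5]
--     if MM in ('01', '03', '05', '07', '08', '10', '12'):
--         max_day = 31
--     elif MM in ('04', '06', '09', '11'):
--         max_day = 30
--     elif MM == '02':
--         max_day = 29 if year % 4 == 0 else 28
--     else:
--         return False
--     d0, d1 = date_of_birth[0], date_of_birth[1]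
--     if not ('0' <= d0 <= '9' and '0' <= d1 <= '9'):
--         return False
--     day = (ord(d0) - 48) * 10 + (ord(d1) - 48)
--     return 1 <= day <= max_day
-- ===== Notes on version B (the rewrite author's own statement) =====
-- stated objective: simpler
-- what changed: B drops A's four loops that build zero-padded day lists and instead picks a per-month maximum day (31/30, and 29 vs 28 for '02' by A's year%4 leap rule) and checks arithmetically that DD is two ASCII digits with 1 <= value <= max day.
import Mathlib
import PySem

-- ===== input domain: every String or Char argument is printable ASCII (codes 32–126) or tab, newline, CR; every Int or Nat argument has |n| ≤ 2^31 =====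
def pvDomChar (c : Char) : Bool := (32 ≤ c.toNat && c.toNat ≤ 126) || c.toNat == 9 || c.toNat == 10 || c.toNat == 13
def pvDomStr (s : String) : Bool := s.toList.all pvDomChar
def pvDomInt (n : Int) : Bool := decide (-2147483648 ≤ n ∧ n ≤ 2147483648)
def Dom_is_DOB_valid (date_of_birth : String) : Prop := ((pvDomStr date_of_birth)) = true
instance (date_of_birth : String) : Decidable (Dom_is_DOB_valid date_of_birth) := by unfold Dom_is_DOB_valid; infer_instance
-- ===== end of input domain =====

set_option maxHeartbeats 4000000


-- B replaces A's four day-list-building loops with a per-month maximum day and an arithmetic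
-- check that DD is two ASCII digits with 1 <= value <= max day (objective: simpler, no lists built).

-- ===== PORT A =====
-- the list 'valid_days' built by 'for day in range(1, hi): valid_days.append(str(day).zfill(2))'
def validDays (hi : Int) : List String :=
  (PySem.List.pyRange 1 hi 1).foldl
    (fun acc day => acc ++ [PySem.Str.zfill (PySem.Int.toStr day) 2]) []

def is_DOB_valid (date_of_birth : String) : Bool :=
  if ¬ (PySem.Str.len date_of_birth == 10) then false
  else if PySem.Str.pyGet? date_of_birth 2 == some '/' &&
          PySem.Str.pyGet? date_of_birth 5 == some '/' then
    let DD := PySem.Str.slice date_of_birth (some 0) (some 2)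
    let MM := PySem.Str.slice date_of_birth (some 3) (some 5)
    let YYYYs := PySem.Str.slice date_of_birth (some 6) (some 10)
    match PySem.Int.ofStr? YYYYs with
    | none => false          -- except ValueError: return False
    | some YYYY =>
      if ¬ (1800 < YYYY ∧ YYYY < 9999) then false
      else if MM ∈ ["01", "03", "05", "07", "08", "10", "12"] then
        if ¬ (DD ∈ validDays 32) then false else true
      else if MM ∈ ["04", "06", "09", "11"] then
        if ¬ (DD ∈ validDays 31) then false else true
      else if MM == "02" then
        if PySem.Int.mod YYYY 4 == 0 then
          if ¬ (DD ∈ validDays 30) then false else true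
        else
          if ¬ (DD ∈ validDays 29) then false else true
      else false
  else false

-- ===== PORT B =====
def is_DOB_valid_alt (date_of_birth : String) : Bool :=
  if PySem.Str.len date_of_birth != 10 ||
     PySem.Str.pyGet? date_of_birth 2 != some '/' ||
     PySem.Str.pyGet? date_of_birth 5 != some '/' then false
  else
    match PySem.Int.ofStr? (PySem.Str.slice date_of_birth (some 6) (some 10)) with
    | none => false
    | some year =>
      if ¬ (1800 < year ∧ year < 9999) then false
      else
        let MM := PySem.Str.slice date_of_birth (some 3) (some 5)
        let maxDay? : Option Int :=
          if MM ∈ ["01", "03", "05", "07", "08", "10", "12"] then some 31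
          else if MM ∈ ["04", "06", "09", "11"] then some 30
          else if MM == "02" then some (if PySem.Int.mod year 4 == 0 then 29 else 28)
          else none
        match maxDay? with
        | none => false
        | some maxDay =>
          match PySem.Str.pyGet? date_of_birth 0, PySem.Str.pyGet? date_of_birth 1 with
          | some d0, some d1 =>
            if ¬ ('0' ≤ d0 ∧ d0 ≤ '9' ∧ '0' ≤ d1 ∧ d1 ≤ '9') then false
            else
              let day : Int := ((d0.toNat : Int) - 48) * 10 + ((d1.toNat : Int) - 48)
              decide (1 ≤ day ∧ day ≤ maxDay)
          | _, _ => false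

-- ===== PRECONDITION & SPEC =====
def Spec_is_DOB_valid (date_of_birth : String) (out : Bool) : Prop := out = is_DOB_valid_alt date_of_birth
instance (date_of_birth : String) (out : Bool) : Decidable (Spec_is_DOB_valid date_of_birth out) := by unfold Spec_is_DOB_valid; infer_instance

-- ===== CLAIM (what is proved, stated in full; the proofs are below) =====
def Claim_equal_is_DOB_valid : Prop := ∀ (date_of_birth : String), Dom_is_DOB_valid date_of_birth → Spec_is_DOB_valid date_of_birth (is_DOB_valid date_of_birth)

-- ===== LEMMAS AND PROOFS =====

theorem charle (c d : Char) : c ≤ d ↔ c.toNat ≤ d.toNat := by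
  rw [Char.le_def]; exact UInt32.le_iff_toNat_le

theorem digit_cases (c : Char) (h1 : '0' ≤ c) (h2 : c ≤ '9') :
    c = '0' ∨ c = '1' ∨ c = '2' ∨ c = '3' ∨ c = '4' ∨ c = '5' ∨ c = '6' ∨ c = '7' ∨ c = '8' ∨ c = '9' := by
  have l1 : 48 ≤ c.toNat := (charle _ _).mp h1
  have l2 : c.toNat ≤ 57 := (charle _ _).mp h2
  have h : c.toNat = 48 ∨ c.toNat = 49 ∨ c.toNat = 50 ∨ c.toNat = 51 ∨ c.toNat = 52 ∨
      c.toNat = 53 ∨ c.toNat = 54 ∨ c.toNat = 55 ∨ c.toNat = 56 ∨ c.toNat = 57 := by omega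
  rcases h with h|h|h|h|h|h|h|h|h|h <;> rw [← Char.ofNat_toNat c, h] <;> decide

theorem daysS29 : validDays 29 = ["01", "02", "03", "04", "05", "06", "07", "08", "09", "10", "11", "12", "13", "14", "15", "16", "17", "18", "19", "20", "21", "22", "23", "24", "25", "26", "27", "28"] := by decide
theorem daysC29 : (validDays 29).map String.toList = [['0', '1'], ['0', '2'], ['0', '3'], ['0', '4'], ['0', '5'], ['0', '6'], ['0', '7'], ['0', '8'], ['0', '9'], ['1', '0'], ['1', '1'], ['1', '2'], ['1', '3'], ['1', '4'], ['1', '5'], ['1', '6'], ['1', '7'], ['1', '8'], ['1', '9'], ['2', '0'], ['2', '1'], ['2', '2'], ['2', '3'], ['2', '4'], ['2', '5'], ['2', '6'], ['2', '7'], ['2', '8']] := by decide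
theorem daysS30 : validDays 30 = ["01", "02", "03", "04", "05", "06", "07", "08", "09", "10", "11", "12", "13", "14", "15", "16", "17", "18", "19", "20", "21", "22", "23", "24", "25", "26", "27", "28", "29"] := by decide
theorem daysC30 : (validDays 30).map String.toList = [['0', '1'], ['0', '2'], ['0', '3'], ['0', '4'], ['0', '5'], ['0', '6'], ['0', '7'], ['0', '8'], ['0', '9'], ['1', '0'], ['1', '1'], ['1', '2'], ['1', '3'], ['1', '4'], ['1', '5'], ['1', '6'], ['1', '7'], ['1', '8'], ['1', '9'], ['2', '0'], ['2', '1'], ['2', '2'], ['2', '3'], ['2', '4'], ['2', '5'], ['2', '6'], ['2', '7'], ['2', '8'], ['2', '9']] := by decide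
theorem daysS31 : validDays 31 = ["01", "02", "03", "04", "05", "06", "07", "08", "09", "10", "11", "12", "13", "14", "15", "16", "17", "18", "19", "20", "21", "22", "23", "24", "25", "26", "27", "28", "29", "30"] := by decide
theorem daysC31 : (validDays 31).map String.toList = [['0', '1'], ['0', '2'], ['0', '3'], ['0', '4'], ['0', '5'], ['0', '6'], ['0', '7'], ['0', '8'], ['0', '9'], ['1', '0'], ['1', '1'], ['1', '2'], ['1', '3'], ['1', '4'], ['1', '5'], ['1', '6'], ['1', '7'], ['1', '8'], ['1', '9'], ['2', '0'], ['2', '1'], ['2', '2'], ['2', '3'], ['2', '4'], ['2', '5'], ['2', '6'], ['2', '7'], ['2', '8'], ['2', '9'], ['3', '0']] := by decide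
theorem daysS32 : validDays 32 = ["01", "02", "03", "04", "05", "06", "07", "08", "09", "10", "11", "12", "13", "14", "15", "16", "17", "18", "19", "20", "21", "22", "23", "24", "25", "26", "27", "28", "29", "30", "31"] := by decide
theorem daysC32 : (validDays 32).map String.toList = [['0', '1'], ['0', '2'], ['0', '3'], ['0', '4'], ['0', '5'], ['0', '6'], ['0', '7'], ['0', '8'], ['0', '9'], ['1', '0'], ['1', '1'], ['1', '2'], ['1', '3'], ['1', '4'], ['1', '5'], ['1', '6'], ['1', '7'], ['1', '8'], ['1', '9'], ['2', '0'], ['2', '1'], ['2', '2'], ['2', '3'], ['2', '4'], ['2', '5'], ['2', '6'], ['2', '7'], ['2', '8'], ['2', '9'], ['3', '0'], ['3', '1']] := by decide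

theorem mem_days (c0 c1 : Char) (hi : Int) (hhi : hi = 29 ∨ hi = 30 ∨ hi = 31 ∨ hi = 32) :
    (String.ofList [c0, c1] ∈ validDays hi) ↔
    (('0' ≤ c0 ∧ c0 ≤ '9' ∧ '0' ≤ c1 ∧ c1 ≤ '9') ∧
     1 ≤ ((c0.toNat : Int) - 48) * 10 + ((c1.toNat : Int) - 48) ∧
     ((c0.toNat : Int) - 48) * 10 + ((c1.toNat : Int) - 48) ≤ hi - 1) := by
  constructor
  · intro h
    have hL := List.mem_map_of_mem (f := String.toList) h
    simp only [String.toList_ofList] at hL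
    rcases hhi with rfl|rfl|rfl|rfl
    · rw [daysC29] at hL
      simp only [List.mem_cons, List.cons.injEq, List.not_mem_nil, or_false, and_true] at hL
      rcases hL with ⟨rfl,rfl⟩|⟨rfl,rfl⟩|⟨rfl,rfl⟩|⟨rfl,rfl⟩|⟨rfl,rfl⟩|⟨rfl,rfl⟩|⟨rfl,rfl⟩|⟨rfl,rfl⟩|⟨rfl,rfl⟩|⟨rfl,rfl⟩|⟨rfl,rfl⟩|⟨rfl,rfl⟩|⟨rfl,rfl⟩|⟨rfl,rfl⟩|⟨rfl,rfl⟩|⟨rfl,rfl⟩|⟨rfl,rfl⟩|⟨rfl,rfl⟩|⟨rfl,rfl⟩|⟨rfl,rfl⟩|⟨rfl,rfl⟩|⟨rfl,rfl⟩|⟨rfl,rfl⟩|⟨rfl,rfl⟩|⟨rfl,rfl⟩|⟨rfl,rfl⟩|⟨rfl,rfl⟩|⟨rfl,rfl⟩ <;> decide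
    · rw [daysC30] at hL
      simp only [List.mem_cons, List.cons.injEq, List.not_mem_nil, or_false, and_true] at hL
      rcases hL with ⟨rfl,rfl⟩|⟨rfl,rfl⟩|⟨rfl,rfl⟩|⟨rfl,rfl⟩|⟨rfl,rfl⟩|⟨rfl,rfl⟩|⟨rfl,rfl⟩|⟨rfl,rfl⟩|⟨rfl,rfl⟩|⟨rfl,rfl⟩|⟨rfl,rfl⟩|⟨rfl,rfl⟩|⟨rfl,rfl⟩|⟨rfl,rfl⟩|⟨rfl,rfl⟩|⟨rfl,rfl⟩|⟨rfl,rfl⟩|⟨rfl,rfl⟩|⟨rfl,rfl⟩|⟨rfl,rfl⟩|⟨rfl,rfl⟩|⟨rfl,rfl⟩|⟨rfl,rfl⟩|⟨rfl,rfl⟩|⟨rfl,rfl⟩|⟨rfl,rfl⟩|⟨rfl,rfl⟩|⟨rfl,rfl⟩|⟨rfl,rfl⟩ <;> decide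
    · rw [daysC31] at hL
      simp only [List.mem_cons, List.cons.injEq, List.not_mem_nil, or_false, and_true] at hL
      rcases hL with ⟨rfl,rfl⟩|⟨rfl,rfl⟩|⟨rfl,rfl⟩|⟨rfl,rfl⟩|⟨rfl,rfl⟩|⟨rfl,rfl⟩|⟨rfl,rfl⟩|⟨rfl,rfl⟩|⟨rfl,rfl⟩|⟨rfl,rfl⟩|⟨rfl,rfl⟩|⟨rfl,rfl⟩|⟨rfl,rfl⟩|⟨rfl,rfl⟩|⟨rfl,rfl⟩|⟨rfl,rfl⟩|⟨rfl,rfl⟩|⟨rfl,rfl⟩|⟨rfl,rfl⟩|⟨rfl,rfl⟩|⟨rfl,rfl⟩|⟨rfl,rfl⟩|⟨rfl,rfl⟩|⟨rfl,rfl⟩|⟨rfl,rfl⟩|⟨rfl,rfl⟩|⟨rfl,rfl⟩|⟨rfl,rfl⟩|⟨rfl,rfl⟩|⟨rfl,rfl⟩ <;> decide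
    · rw [daysC32] at hL
      simp only [List.mem_cons, List.cons.injEq, List.not_mem_nil, or_false, and_true] at hL
      rcases hL with ⟨rfl,rfl⟩|⟨rfl,rfl⟩|⟨rfl,rfl⟩|⟨rfl,rfl⟩|⟨rfl,rfl⟩|⟨rfl,rfl⟩|⟨rfl,rfl⟩|⟨rfl,rfl⟩|⟨rfl,rfl⟩|⟨rfl,rfl⟩|⟨rfl,rfl⟩|⟨rfl,rfl⟩|⟨rfl,rfl⟩|⟨rfl,rfl⟩|⟨rfl,rfl⟩|⟨rfl,rfl⟩|⟨rfl,rfl⟩|⟨rfl,rfl⟩|⟨rfl,rfl⟩|⟨rfl,rfl⟩|⟨rfl,rfl⟩|⟨rfl,rfl⟩|⟨rfl,rfl⟩|⟨rfl,rfl⟩|⟨rfl,rfl⟩|⟨rfl,rfl⟩|⟨rfl,rfl⟩|⟨rfl,rfl⟩|⟨rfl,rfl⟩|⟨rfl,rfl⟩|⟨rfl,rfl⟩ <;> decide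
  · rintro ⟨⟨h1, h2, h3, h4⟩, h5, h6⟩
    rcases hhi with rfl|rfl|rfl|rfl <;>
      rcases digit_cases c0 h1 h2 with rfl|rfl|rfl|rfl|rfl|rfl|rfl|rfl|rfl|rfl <;>
      rcases digit_cases c1 h3 h4 with rfl|rfl|rfl|rfl|rfl|rfl|rfl|rfl|rfl|rfl <;>
      revert h5 h6 <;>
      simp only [daysS29, daysS30, daysS31, daysS32] <;> decide

theorem main_eq (c0 c1 c2 c3 c4 c5 c6 c7 c8 c9 : Char) :
    is_DOB_valid (String.ofList [c0,c1,c2,c3,c4,c5,c6,c7,c8,c9]) =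
    is_DOB_valid_alt (String.ofList [c0,c1,c2,c3,c4,c5,c6,c7,c8,c9]) := by
  have e0 : PySem.Str.pyGet? (String.ofList [c0,c1,c2,c3,c4,c5,c6,c7,c8,c9]) 0 = some c0 := by simp [PySem.Str.pyGet?, PySem.List.pyGet?, PySem.List.pyIdx?]
  have e1 : PySem.Str.pyGet? (String.ofList [c0,c1,c2,c3,c4,c5,c6,c7,c8,c9]) 1 = some c1 := by simp [PySem.Str.pyGet?, PySem.List.pyGet?, PySem.List.pyIdx?]
  have e2 : PySem.Str.pyGet? (String.ofList [c0,c1,c2,c3,c4,c5,c6,c7,c8,c9]) 2 = some c2 := by simp [PySem.Str.pyGet?, PySem.List.pyGet?, PySem.List.pyIdx?]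
  have e5 : PySem.Str.pyGet? (String.ofList [c0,c1,c2,c3,c4,c5,c6,c7,c8,c9]) 5 = some c5 := by simp [PySem.Str.pyGet?, PySem.List.pyGet?, PySem.List.pyIdx?]
  have elen : PySem.Str.len (String.ofList [c0,c1,c2,c3,c4,c5,c6,c7,c8,c9]) = 10 := by simp [PySem.Str.len]
  have s02 : PySem.Str.slice (String.ofList [c0,c1,c2,c3,c4,c5,c6,c7,c8,c9]) (some 0) (some 2) = String.ofList [c0,c1] := by simp [PySem.Str.slice, PySem.List.slice]
  have s35 : PySem.Str.slice (String.ofList [c0,c1,c2,c3,c4,c5,c6,c7,c8,c9]) (some 3) (some 5) = String.ofList [c3,c4] := by simp [PySem.Str.slice, PySem.List.slice]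
  have s610 : PySem.Str.slice (String.ofList [c0,c1,c2,c3,c4,c5,c6,c7,c8,c9]) (some 6) (some 10) = String.ofList [c6,c7,c8,c9] := by simp [PySem.Str.slice, PySem.List.slice]
  simp only [is_DOB_valid, is_DOB_valid_alt, elen, e0, e1, e2, e5, s02, s35, s610]
  by_cases hc2 : c2 = '/' <;> by_cases hc5 : c5 = '/' <;>
    simp [hc2, hc5]
  case pos =>
    cases hY : PySem.Int.ofChars? [c6,c7,c8,c9] with
    | none => rfl
    | some Y =>
      by_cases hm1 : (String.ofList [c3,c4] = "01" ∨ String.ofList [c3,c4] = "03" ∨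
          String.ofList [c3,c4] = "05" ∨ String.ofList [c3,c4] = "07" ∨
          String.ofList [c3,c4] = "08" ∨ String.ofList [c3,c4] = "10" ∨ String.ofList [c3,c4] = "12")
      · simp only [hm1, if_true]
        rw [Bool.eq_iff_iff]
        simp only [Bool.and_eq_true, Bool.not_eq_true', decide_eq_true_eq, decide_eq_false_iff_not, not_lt]
        rw [mem_days c0 c1 32 (by norm_num)]
        norm_num
      · by_cases hm2 : (String.ofList [c3,c4] = "04" ∨ String.ofList [c3,c4] = "06" ∨
            String.ofList [c3,c4] = "09" ∨ String.ofList [c3,c4] = "11")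
        · simp only [hm1, hm2, if_true, if_false]
          rw [Bool.eq_iff_iff]
          simp only [Bool.and_eq_true, Bool.not_eq_true', decide_eq_true_eq, decide_eq_false_iff_not, not_lt]
          rw [mem_days c0 c1 31 (by norm_num)]
          norm_num
        · by_cases hm02 : String.ofList [c3,c4] = "02"
          · simp only [hm02]
            by_cases hleap : (4:Int) ∣ Y
            · simp only [hleap, if_true, String.reduceEq, or_self, decide_true, reduceIte]
              rw [Bool.eq_iff_iff]
              simp only [Bool.and_eq_true, Bool.not_eq_true', decide_eq_true_eq, decide_eq_false_iff_not, not_lt]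
              rw [mem_days c0 c1 30 (by norm_num)]
              norm_num
            · simp only [hleap, if_false, String.reduceEq, or_self, decide_true, reduceIte]
              rw [Bool.eq_iff_iff]
              simp only [Bool.and_eq_true, Bool.not_eq_true', decide_eq_true_eq, decide_eq_false_iff_not, not_lt]
              rw [mem_days c0 c1 29 (by norm_num)]
              norm_num
          · simp [hm1, hm2, hm02]
theorem exists_ten (l : List Char) (h : l.length = 10) :
    ∃ c0 c1 c2 c3 c4 c5 c6 c7 c8 c9, l = [c0,c1,c2,c3,c4,c5,c6,c7,c8,c9] := by
  rcases l with _|⟨c0, _|⟨c1, _|⟨c2, _|⟨c3, _|⟨c4, _|⟨c5, _|⟨c6, _|⟨c7, _|⟨c8, _|⟨c9, _|⟨x, t⟩⟩⟩⟩⟩⟩⟩⟩⟩⟩⟩ <;>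
    simp at h
  exact ⟨c0,c1,c2,c3,c4,c5,c6,c7,c8,c9, rfl⟩
theorem is_DOB_valid_spec : Claim_equal_is_DOB_valid := by
  intro s _
  unfold Spec_is_DOB_valid
  by_cases hlen : s.toList.length = 10
  · obtain ⟨c0,c1,c2,c3,c4,c5,c6,c7,c8,c9,hL⟩ := exists_ten s.toList hlen
    have hs : s = String.ofList [c0,c1,c2,c3,c4,c5,c6,c7,c8,c9] := by
      rw [← hL, String.ofList_toList]
    rw [hs]
    exact main_eq c0 c1 c2 c3 c4 c5 c6 c7 c8 c9
  · have hlen'' : ¬ ((s.length : Int) = 10) := by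
      rw [← String.length_toList]
      intro h
      exact hlen (by exact_mod_cast h)
    have ha : is_DOB_valid s = false := by
      simp [is_DOB_valid, PySem.Str.len, hlen'']
    have hb : is_DOB_valid_alt s = false := by
      simp [is_DOB_valid_alt, PySem.Str.len, hlen'']
    rw [ha, hb]
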